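-- pv_equiv track=rewrite | github.com/MDx-Vision/fcra | services/credit_report_ocr_parser.py | get_worst_payment_status
-- ===== SOURCE A (Python) =====
-- from typing import Dict, List, Optional, Any, Tuple
--
-- def get_worst_payment_status(account: Dict[str, Any]) -> Dict[str, str]:
--     """Get the worst payment status across all bureaus for display."""
--     statuses = [
--         str(account.get("tu_payment_status", "")).lower(),
--         str(account.get("ex_payment_status", "")).lower(),
--         str(account.get("eq_payment_status", "")).lower()
--     ]
--
--     # Check for severe delinquency first
--     for status in statuses:
--         if "90" in status or "120" in status or "charge" in status:
--             return {"text": "90+ Days Late", "class": "badge-danger", "color": "red"}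
--
--     for status in statuses:
--         if "60" in status:
--             return {"text": "60 Days Past Due", "class": "badge-danger", "color": "red"}
--
--     for status in statuses:
--         if "30" in status or "not more than" in status:
--             return {"text": "30 Days Past Due", "class": "badge-warning", "color": "yellow"}
--
--     # Check for good status
--     for status in statuses:
--         if "current" in status or "pays" in status or "agreed" in status:
--             return {"text": "Current", "class": "badge-success", "color": "green"}
--
--     # Check for closed
--     for status in statuses:
--         if "closed" in status or "paid" in status:
--             return {"text": "Closed", "class": "badge-secondary", "color": "gray"}
--
--     return {"text": "Unknown", "class": "badge-secondary", "color": "gray"}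
-- ===== SOURCE B (Python) =====
-- TIERS = [
--     (["90", "120", "charge"], {"text": "90+ Days Late", "class": "badge-danger", "color": "red"}),
--     (["60"], {"text": "60 Days Past Due", "class": "badge-danger", "color": "red"}),
--     (["30", "not more than"], {"text": "30 Days Past Due", "class": "badge-warning", "color": "yellow"}),
--     (["current", "pays", "agreed"], {"text": "Current", "class": "badge-success", "color": "green"}),
--     (["closed", "paid"], {"text": "Closed", "class": "badge-secondary", "color": "gray"}),
-- ]
--
--
-- def _tier(status):
--     """Index of the first (worst) tier some keyword of which occurs in status; len(TIERS) if none."""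
--     for i, (keywords, _badge) in enumerate(TIERS):
--         if any(k in status for k in keywords):
--             return i
--     return len(TIERS)
--
--
-- def get_worst_payment_status(account):
--     """Get the worst payment status across all bureaus for display."""
--     t1 = _tier(str(account.get("tu_payment_status", "")).lower())
--     t2 = _tier(str(account.get("ex_payment_status", "")).lower())
--     t3 = _tier(str(account.get("eq_payment_status", "")).lower())
--     worst = min(t1, t2, t3)
--     if worst < len(TIERS):
--         return dict(TIERS[worst][1])
--     return {"text": "Unknown", "class": "badge-secondary", "color": "gray"}
-- ===== Notes on version B (the rewrite author's own statement) =====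
-- stated objective: simpler
-- what changed: Replaced A's five priority-ordered scanning passes over the status list by one ordered (keywords, badge) tier table: each status is ranked by the first tier it matches, and the badge of the minimum rank (or Unknown) is returned.
import Mathlib
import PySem

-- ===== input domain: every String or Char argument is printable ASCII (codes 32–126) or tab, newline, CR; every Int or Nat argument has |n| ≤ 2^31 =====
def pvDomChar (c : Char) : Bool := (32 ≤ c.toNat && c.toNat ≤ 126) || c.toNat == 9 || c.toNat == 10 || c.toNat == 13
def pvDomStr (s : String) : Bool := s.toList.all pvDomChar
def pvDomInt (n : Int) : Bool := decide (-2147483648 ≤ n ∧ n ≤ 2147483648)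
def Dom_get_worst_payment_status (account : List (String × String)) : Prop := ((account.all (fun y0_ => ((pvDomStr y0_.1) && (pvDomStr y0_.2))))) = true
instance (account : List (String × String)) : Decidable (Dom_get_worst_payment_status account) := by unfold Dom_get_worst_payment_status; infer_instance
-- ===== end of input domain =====

-- B replaces A's five priority-ordered scanning passes by one table of tiers and a
-- per-status "first matching tier" rank, returning the badge of the minimum rank (objective: simpler).

-- ===== PORT A =====
-- A-side helper: one priority pass after another over the status list, first hit returns.
def pvPassesA (statuses : List String) : List (String × String) :=
  if statuses.any (fun s => PySem.Str.isIn "90" s || PySem.Str.isIn "120" s || PySem.Str.isIn "charge" s) then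
    [("text", "90+ Days Late"), ("class", "badge-danger"), ("color", "red")]
  else if statuses.any (fun s => PySem.Str.isIn "60" s) then
    [("text", "60 Days Past Due"), ("class", "badge-danger"), ("color", "red")]
  else if statuses.any (fun s => PySem.Str.isIn "30" s || PySem.Str.isIn "not more than" s) then
    [("text", "30 Days Past Due"), ("class", "badge-warning"), ("color", "yellow")]
  else if statuses.any (fun s => PySem.Str.isIn "current" s || PySem.Str.isIn "pays" s || PySem.Str.isIn "agreed" s) then
    [("text", "Current"), ("class", "badge-success"), ("color", "green")]
  else if statuses.any (fun s => PySem.Str.isIn "closed" s || PySem.Str.isIn "paid" s) then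
    [("text", "Closed"), ("class", "badge-secondary"), ("color", "gray")]
  else
    [("text", "Unknown"), ("class", "badge-secondary"), ("color", "gray")]

def get_worst_payment_status (account : List (String × String)) : List (String × String) :=
  pvPassesA
    [PySem.Str.lower ((PySem.Dict.mk account).getD "tu_payment_status" ""),
     PySem.Str.lower ((PySem.Dict.mk account).getD "ex_payment_status" ""),
     PySem.Str.lower ((PySem.Dict.mk account).getD "eq_payment_status" "")]

-- ===== PORT B =====
-- B-side: ordered table of (keywords, badge) tiers.
def pvTiers : List (List String × List (String × String)) :=
  [(["90", "120", "charge"], [("text", "90+ Days Late"), ("class", "badge-danger"), ("color", "red")]),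
   (["60"], [("text", "60 Days Past Due"), ("class", "badge-danger"), ("color", "red")]),
   (["30", "not more than"], [("text", "30 Days Past Due"), ("class", "badge-warning"), ("color", "yellow")]),
   (["current", "pays", "agreed"], [("text", "Current"), ("class", "badge-success"), ("color", "green")]),
   (["closed", "paid"], [("text", "Closed"), ("class", "badge-secondary"), ("color", "gray")])]

-- index of the first tier a keyword of which occurs in the status; list length if none
def pvTierIdx (tiers : List (List String × List (String × String))) (status : String) : Nat :=
  match tiers with
  | [] => 0
  | (keywords, _badge) :: rest =>
      if keywords.any (fun k => PySem.Str.isIn k status) then 0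
      else 1 + pvTierIdx rest status

def get_worst_payment_status_alt (account : List (String × String)) : List (String × String) :=
  let t1 := pvTierIdx pvTiers (PySem.Str.lower ((PySem.Dict.mk account).getD "tu_payment_status" ""))
  let t2 := pvTierIdx pvTiers (PySem.Str.lower ((PySem.Dict.mk account).getD "ex_payment_status" ""))
  let t3 := pvTierIdx pvTiers (PySem.Str.lower ((PySem.Dict.mk account).getD "eq_payment_status" ""))
  let worst := min (min t1 t2) t3
  ((pvTiers[worst]?).map Prod.snd).getD [("text", "Unknown"), ("class", "badge-secondary"), ("color", "gray")]

-- ===== PRECONDITION & SPEC =====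
def Spec_get_worst_payment_status (account : List (String × String)) (out : List (String × String)) : Prop := out = get_worst_payment_status_alt account
instance (account : List (String × String)) (out : List (String × String)) : Decidable (Spec_get_worst_payment_status account out) := by unfold Spec_get_worst_payment_status; infer_instance

-- ===== CLAIM (what is proved, stated in full; the proofs are below) =====
def Claim_equal_get_worst_payment_status : Prop := ∀ (account : List (String × String)), Dom_get_worst_payment_status account → Spec_get_worst_payment_status account (get_worst_payment_status account)

-- ===== LEMMAS AND PROOFS =====

-- keyword hits of the five tiers, for an arbitrary status string
def pvM0 (s : String) : Bool := PySem.Str.isIn "90" s || PySem.Str.isIn "120" s || PySem.Str.isIn "charge" s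
def pvM1 (s : String) : Bool := PySem.Str.isIn "60" s
def pvM2 (s : String) : Bool := PySem.Str.isIn "30" s || PySem.Str.isIn "not more than" s
def pvM3 (s : String) : Bool := PySem.Str.isIn "current" s || PySem.Str.isIn "pays" s || PySem.Str.isIn "agreed" s
def pvM4 (s : String) : Bool := PySem.Str.isIn "closed" s || PySem.Str.isIn "paid" s

-- B's per-status rank, written as one chain of the five tier hits
lemma pvTierIdx_eq (s : String) :
    pvTierIdx pvTiers s =
      if pvM0 s then 0 else if pvM1 s then 1 else if pvM2 s then 2
      else if pvM3 s then 3 else if pvM4 s then 4 else 5 := by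
  simp only [pvTierIdx, pvTiers, List.any_cons, List.any_nil, Bool.or_false, Bool.or_assoc,
    pvM0, pvM1, pvM2, pvM3, pvM4]
  split_ifs <;> omega

-- A's five passes over [s1, s2, s3], written as a table lookup at the priority index
lemma pvPassesA_eq (s1 s2 s3 : String) :
    pvPassesA [s1, s2, s3] =
      ((pvTiers[(if pvM0 s1 || (pvM0 s2 || pvM0 s3) then 0
          else if pvM1 s1 || (pvM1 s2 || pvM1 s3) then 1
          else if pvM2 s1 || (pvM2 s2 || pvM2 s3) then 2
          else if pvM3 s1 || (pvM3 s2 || pvM3 s3) then 3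
          else if pvM4 s1 || (pvM4 s2 || pvM4 s3) then 4 else 5 : Nat)]?).map Prod.snd).getD
        [("text", "Unknown"), ("class", "badge-secondary"), ("color", "gray")] := by
  simp only [pvPassesA, List.any_cons, List.any_nil, Bool.or_false, Bool.or_assoc,
    pvM0, pvM1, pvM2, pvM3, pvM4]
  split_ifs <;> simp [pvTiers]

-- the priority index of the chain over two statuses is the min of the per-status ranks
lemma pvIdx2 : ∀ (b0 b1 b2 b3 b4 c0 c1 c2 c3 c4 : Bool),
    (if b0 || c0 then 0 else if b1 || c1 then 1 else if b2 || c2 then 2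
     else if b3 || c3 then 3 else if b4 || c4 then 4 else 5)
    = min (if b0 then 0 else if b1 then 1 else if b2 then 2 else if b3 then 3 else if b4 then 4 else 5)
          (if c0 then 0 else if c1 then 1 else if c2 then 2 else if c3 then 3 else if c4 then 4 else 5) := by
  decide

lemma pvIdx3 (b0 b1 b2 b3 b4 c0 c1 c2 c3 c4 d0 d1 d2 d3 d4 : Bool) :
    (if b0 || (c0 || d0) then 0 else if b1 || (c1 || d1) then 1 else if b2 || (c2 || d2) then 2
     else if b3 || (c3 || d3) then 3 else if b4 || (c4 || d4) then 4 else 5)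
    = min (min
        (if b0 then 0 else if b1 then 1 else if b2 then 2 else if b3 then 3 else if b4 then 4 else 5)
        (if c0 then 0 else if c1 then 1 else if c2 then 2 else if c3 then 3 else if c4 then 4 else 5))
        (if d0 then 0 else if d1 then 1 else if d2 then 2 else if d3 then 3 else if d4 then 4 else 5) := by
  rw [← pvIdx2, ← pvIdx2]
  simp only [← Bool.or_assoc]

lemma pvCore (s1 s2 s3 : String) :
    pvPassesA [s1, s2, s3] =
      ((pvTiers[min (min (pvTierIdx pvTiers s1) (pvTierIdx pvTiers s2)) (pvTierIdx pvTiers s3)]?).map Prod.snd).getD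
        [("text", "Unknown"), ("class", "badge-secondary"), ("color", "gray")] := by
  rw [pvPassesA_eq, pvTierIdx_eq s1, pvTierIdx_eq s2, pvTierIdx_eq s3, pvIdx3]

-- ===== VERDICT (by name: the statement is the Claim_ definition above) =====
theorem get_worst_payment_status_spec : Claim_equal_get_worst_payment_status := by
  intro account _
  unfold Spec_get_worst_payment_status
  rw [get_worst_payment_status, get_worst_payment_status_alt]
  exact pvCore _ _ _
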